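-- pv_equiv track=rewrite | github.com/lishuwnc/Kickstart-Framework-Python | archive/B2015.py | solveBD2015
-- ===== SOURCE A (Python) =====
-- def solveBD2015(n, k):
--     res = [[0] * (n + 1) for i in range(n + 1)]
--     for i in range(n + 1):
--         res[0][i] = 1
--     for i in range(1, n + 1):
--         for j in range(i, n + 1):
--             res[i][j] = res[i - 1][j] + (res[i][j - 1] if i < j else 0)
--     i, j = n, n
--     s = ''
--     if k > res[n][n]:
--         return 'Doesn\'t Exist!'
--     while i > 0 or j > 0:
--         if i > 0 and res[i - 1][j] >= k:
--             s += '('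
--             i -= 1
--         else:
--             s += ')'
--             k -= res[i - 1][j]
--             j -= 1
--     return s
-- ===== SOURCE B (Python) =====
-- def solveBD2015(n, k):
--     # Closed-form counting: no DP table; ballot counts computed from binomials
--     # during the reconstruction walk.
--     def binom(a, b):
--         if b < 0 or b > a:
--             return 0
--         r = 1
--         for t in range(b):
--             r = r * (a - t) // (t + 1)
--         return r
--
--     def ballot(i, j):
--         # number of valid suffixes with i '(' and j ')' left (0 <= i <= j)
--         return binom(i + j, i) - binom(i + j, i - 1)
--
--     if k > ballot(n, n):
--         return "Doesn't Exist!"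
--     i, j = n, n
--     s = ''
--     while i > 0 or j > 0:
--         if i > 0 and ballot(i - 1, j) >= k:
--             s += '('
--             i -= 1
--         else:
--             if i > 0:
--                 k -= ballot(i - 1, j)
--             s += ')'
--             j -= 1
--     return s
-- ===== Notes on version B (the rewrite author's own statement) =====
-- stated objective: alternative
-- what changed: B replaces A's (n+1)x(n+1) Catalan-triangle DP table by closed-form ballot counts computed from binomial coefficients (C(i+j,i)-C(i+j,i-1)) on the fly during the reconstruction walk, using O(n) memory instead of O(n^2).
import Mathlib
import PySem

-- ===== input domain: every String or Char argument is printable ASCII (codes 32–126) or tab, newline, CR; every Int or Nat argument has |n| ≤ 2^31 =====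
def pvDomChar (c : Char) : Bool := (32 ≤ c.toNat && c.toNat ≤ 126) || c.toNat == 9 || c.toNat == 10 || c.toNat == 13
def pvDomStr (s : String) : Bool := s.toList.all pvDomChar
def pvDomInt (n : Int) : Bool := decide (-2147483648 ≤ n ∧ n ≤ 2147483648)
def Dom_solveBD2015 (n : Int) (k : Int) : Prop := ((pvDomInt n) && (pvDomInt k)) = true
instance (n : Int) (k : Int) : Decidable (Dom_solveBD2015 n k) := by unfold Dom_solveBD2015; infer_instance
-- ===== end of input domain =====

-- B replaces A's O(n^2) Catalan-triangle DP table by closed-form ballot counts computed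
-- from binomial coefficients during the reconstruction walk (alternative algorithm, O(n) memory).

-- ===== PORT A =====
-- res[i][j] read with Python index semantics (negative index wraps); the default 0 of
-- pyGetD is never reached on inputs admitted by Pre_ (all of Python A's reads are in range there).
def cellGet (r : List (List Int)) (i j : Int) : Int :=
  PySem.List.pyGetD (PySem.List.pyGetD r i ([] : List Int)) j 0

-- res[i][j] = v; every assignment A performs uses nonnegative in-range indices, where
-- List.set at i.toNat is exactly Python's assignment.
def cellSet (r : List (List Int)) (i j : Int) (v : Int) : List (List Int) :=
  r.set i.toNat ((r.getD i.toNat []).set j.toNat v)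

-- A's while loop; each iteration decreases i+j by exactly 1, from 2n down to 0, so the
-- fuel (n+n).toNat given at the call site is exact (the guard only makes the recursion total).
def walkA (res : List (List Int)) : Nat → Int → Int → Int → String → String
  | 0, _, _, _, s => s
  | f+1, i, j, k, s =>
    if i > 0 ∨ j > 0 then
      if i > 0 ∧ cellGet res (i-1) j ≥ k then
        walkA res f (i-1) j k (s ++ "(")
      else
        walkA res f i (j-1) (k - cellGet res (i-1) j) (s ++ ")")
    else s

def solveBD2015 (n : Int) (k : Int) : String :=
  let res0 : List (List Int) :=
    (PySem.List.pyRange 0 (n+1) 1).map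
      (fun _ => (PySem.List.pyRange 0 (n+1) 1).map (fun _ => (0 : Int)))
  let res1 := (PySem.List.pyRange 0 (n+1) 1).foldl (fun r i => cellSet r 0 i 1) res0
  let res2 := (PySem.List.pyRange 1 (n+1) 1).foldl (fun r i =>
      (PySem.List.pyRange i (n+1) 1).foldl (fun r j =>
        cellSet r i j (cellGet r (i-1) j + (if i < j then cellGet r i (j-1) else 0))) r) res1
  if k > cellGet res2 n n then "Doesn't Exist!"
  else walkA res2 (n+n).toNat n n k ""

-- ===== PORT B =====
def binomB (a b : Int) : Int :=
  if b < 0 ∨ b > a then 0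
  else (PySem.List.pyRange 0 b 1).foldl
        (fun r t => PySem.Int.floordiv (r * (a - t)) (t + 1)) 1

def ballotB (i j : Int) : Int := binomB (i + j) i - binomB (i + j) (i - 1)

-- B's while loop, with the same exact-fuel totalisation as walkA.
def walkB : Nat → Int → Int → Int → String → String
  | 0, _, _, _, s => s
  | f+1, i, j, k, s =>
    if i > 0 ∨ j > 0 then
      if i > 0 ∧ ballotB (i-1) j ≥ k then
        walkB f (i-1) j k (s ++ "(")
      else
        walkB f i (j-1) (if i > 0 then k - ballotB (i-1) j else k) (s ++ ")")
    else s

def solveBD2015_alt (n : Int) (k : Int) : String :=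
  if k > ballotB n n then "Doesn't Exist!"
  else walkB (n+n).toNat n n k ""

-- ===== PRECONDITION & SPEC =====
-- A raises IndexError for every n < 0 (it indexes an empty table); it returns on all n ≥ 0.
def Pre_solveBD2015 (n : Int) (k : Int) : Prop := 0 ≤ n
instance (n : Int) (k : Int) : Decidable (Pre_solveBD2015 n k) := by unfold Pre_solveBD2015; infer_instance

def pvWitness_solveBD2015 : Int × Int := (3, 4)

def Spec_solveBD2015 (n : Int) (k : Int) (out : String) : Prop := out = solveBD2015_alt n k
instance (n : Int) (k : Int) (out : String) : Decidable (Spec_solveBD2015 n k out) := by unfold Spec_solveBD2015; infer_instance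

-- ===== CLAIM (what is proved, stated in full; the proofs are below) =====
def Claim_equal_solveBD2015 : Prop := ∀ (n : Int) (k : Int), Dom_solveBD2015 n k → Pre_solveBD2015 n k → Spec_solveBD2015 n k (solveBD2015 n k)

-- ===== LEMMAS AND PROOFS =====

-- The Catalan-triangle count: number of balanced completions with i '(' and j ')' left.
def cnt : Nat → Nat → Int
  | 0, _ => 1
  | (i+1), j =>
    if i+1 ≤ j then cnt i j + (if i+1 < j then cnt (i+1) (j-1) else 0) else 0
termination_by i j => (i, j)
decreasing_by
  · exact Prod.Lex.left _ _ (Nat.lt_succ_self i)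
  · exact Prod.Lex.right _ (by omega)

theorem cnt_choose : ∀ (s i j : Nat), i + j ≤ s → i ≤ j →
    cnt i j = ((i+j).choose i : Int) - (if i = 0 then 0 else ((i+j).choose (i-1) : Int)) := by
  intro s
  induction s with
  | zero =>
    intro i j h1 h2
    cases i with
    | zero =>
      have : j = 0 := by omega
      subst this; simp [cnt]
    | succ m => omega
  | succ s ih =>
    intro i j h1 h2
    cases i with
    | zero => simp [cnt]
    | succ m =>
      rw [cnt, if_pos h2]
      have ih1 := ih m j (by omega) (by omega)
      by_cases hlt : m + 1 < j
      · have ih2 := ih (m+1) (j-1) (by omega) (by omega)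
        rw [if_pos hlt, ih1, ih2]
        rw [show m + 1 + (j - 1) = m + j from by omega,
            show m + 1 + j = (m + j) + 1 from by omega]
        simp only [if_neg (Nat.succ_ne_zero m), Nat.succ_sub_one]
        have p1 : ((m + j) + 1).choose (m+1) = (m+j).choose m + (m+j).choose (m+1) :=
          Nat.choose_succ_succ _ _
        cases m with
        | zero =>
          simp only [Nat.choose_zero_right]
          push_cast [p1]
          simp
        | succ m' =>
          have p2 : ((m' + 1 + j) + 1).choose (m'+1) = (m'+1+j).choose m' + (m'+1+j).choose (m'+1) :=
            Nat.choose_succ_succ _ _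
          simp only [if_neg (Nat.succ_ne_zero m'), Nat.succ_sub_one]
          push_cast [p1, p2]
          linarith
      · have hje : j = m + 1 := by omega
        subst hje
        rw [if_neg hlt, ih1]
        have p1 : ((m + (m+1)) + 1).choose (m+1) = (m+(m+1)).choose m + (m+(m+1)).choose (m+1) :=
          Nat.choose_succ_succ _ _
        rw [show m + 1 + (m + 1) = (m + (m+1)) + 1 from by omega]
        have psym : (m+(m+1)).choose (m+1) = (m+(m+1)).choose m := by
          have h := Nat.choose_symm (n := m+(m+1)) (k := m) (by omega)
          rw [show m + (m+1) - m = m + 1 from by omega] at h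
          exact h
        simp only [if_neg (Nat.succ_ne_zero m), Nat.succ_sub_one]
        cases m with
        | zero => decide
        | succ m' =>
          have p2 : ((m' + 1 + (m'+1+1)) + 1).choose (m'+1) = (m'+1+(m'+1+1)).choose m' + (m'+1+(m'+1+1)).choose (m'+1) :=
            Nat.choose_succ_succ _ _
          simp only [if_neg (Nat.succ_ne_zero m'), Nat.succ_sub_one]
          push_cast [p1, p2, psym]
          linarith [psym]

theorem binom_loop (a : Nat) : ∀ (m : Nat), m ≤ a →
    (PySem.List.pyRange 0 (m : Int) 1).foldl
        (fun r t => PySem.Int.floordiv (r * ((a : Int) - t)) (t + 1)) 1 = (a.choose m : Int) := by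
  intro m
  induction m with
  | zero => intro _; simp [PySem.List.pyRange_one_eq_nil]
  | succ m ih =>
    intro h
    rw [show ((m + 1 : Nat) : Int) = (m : Int) + 1 from by push_cast; ring,
        PySem.List.pyRange_one_succ_right (by positivity), List.foldl_append,
        ih (by omega)]
    simp only [List.foldl_cons, List.foldl_nil]
    rw [show (a : Int) - (m : Int) = ((a - m : Nat) : Int) from by push_cast [Nat.cast_sub (by omega : m ≤ a)]; ring]
    rw [show ((a.choose m : Nat) : Int) * ((a - m : Nat) : Int) = (((a.choose m) * (a - m) : Nat) : Int) from by push_cast; ring]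
    rw [show ((m : Int) + 1) = ((m + 1 : Nat) : Int) from by push_cast; ring]
    rw [PySem.Int.floordiv_natCast]
    rw [← Nat.choose_succ_right_eq]
    rw [Nat.mul_div_cancel _ (by omega)]

theorem binomB_eq (a b : Nat) (h : b ≤ a) : binomB (a : Int) (b : Int) = (a.choose b : Int) := by
  rw [binomB, if_neg (by omega)]
  exact binom_loop a b h

theorem ballotB_eq (i j : Int) (h0 : 0 ≤ i) (hij : i ≤ j) :
    ballotB i j = cnt i.toNat j.toNat := by
  obtain ⟨iN, rfl⟩ : ∃ m : Nat, i = (m : Int) := ⟨i.toNat, by omega⟩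
  obtain ⟨jN, rfl⟩ : ∃ m : Nat, j = (m : Int) := ⟨j.toNat, by omega⟩
  have hN : iN ≤ jN := by exact_mod_cast hij
  rw [ballotB, show (iN : Int) + (jN : Int) = ((iN + jN : Nat) : Int) from by push_cast; ring]
  rw [binomB_eq _ _ (by omega)]
  simp only [Int.toNat_natCast]
  rw [cnt_choose (iN + jN) iN jN (by omega) hN]
  cases iN with
  | zero =>
    rw [show ((0 : Nat) : Int) - 1 = (-1 : Int) from by norm_num]
    rw [binomB, if_pos (by norm_num)]
    simp
  | succ m =>
    simp only [if_neg (Nat.succ_ne_zero m), Nat.succ_sub_one]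
    rw [show ((m + 1 : Nat) : Int) - 1 = ((m : Nat) : Int) from by push_cast; ring]
    rw [binomB_eq _ _ (by omega)]

theorem walkA_tail (res : List (List Int)) :
    ∀ (f : Nat) (k : Int) (s : String),
      walkA res f 0 (f : Int) k s = s ++ String.ofList (List.replicate f ')') := by
  intro f
  induction f with
  | zero => intro k s; simp [walkA]
  | succ f ih =>
    intro k s
    rw [walkA]
    rw [if_pos (by right; positivity)]
    rw [if_neg (by simp)]
    rw [show ((f + 1 : Nat) : Int) - 1 = (f : Int) from by push_cast; ring]
    rw [ih]
    rw [List.replicate_succ,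
        show (')' :: List.replicate f ')') = [')'] ++ List.replicate f ')' from rfl,
        String.ofList_append, ← String.append_assoc,
        show String.ofList [')'] = ")" from rfl]

theorem walkB_tail :
    ∀ (f : Nat) (k : Int) (s : String),
      walkB f 0 (f : Int) k s = s ++ String.ofList (List.replicate f ')') := by
  intro f
  induction f with
  | zero => intro k s; simp [walkB]
  | succ f ih =>
    intro k s
    rw [walkB]
    rw [if_pos (by right; positivity)]
    rw [if_neg (by simp)]
    rw [show ((f + 1 : Nat) : Int) - 1 = (f : Int) from by push_cast; ring]
    rw [if_neg (by simp)]
    rw [ih]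
    rw [List.replicate_succ,
        show (')' :: List.replicate f ')') = [')'] ++ List.replicate f ')' from rfl,
        String.ofList_append, ← String.append_assoc,
        show String.ofList [')'] = ")" from rfl]

def mget (r : List (List Int)) (i j : Nat) : Int := (r.getD i []).getD j 0
def Shaped (N : Nat) (r : List (List Int)) : Prop :=
  r.length = N ∧ ∀ row ∈ r, row.length = N

theorem shaped_row {N : Nat} {r : List (List Int)} (h : Shaped N r) (i : Nat) (hi : i < N) :
    (r.getD i []).length = N := by
  have hr := h.1
  have hlen : i < r.length := by omega
  rw [List.getD_eq_getElem r [] hlen]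
  exact h.2 _ (List.getElem_mem hlen)

theorem cellGet_eq_mget (r : List (List Int)) (i j : Int) (h0 : 0 ≤ i) (h1 : 0 ≤ j) :
    cellGet r i j = mget r i.toNat j.toNat := by
  obtain ⟨a, rfl⟩ : ∃ m : Nat, i = (m : Int) := ⟨i.toNat, by omega⟩
  obtain ⟨b, rfl⟩ : ∃ m : Nat, j = (m : Int) := ⟨j.toNat, by omega⟩
  simp [cellGet, mget, PySem.List.pyGetD_natCast]

theorem cellSet_natCast (r : List (List Int)) (a b : Nat) (v : Int) :
    cellSet r (a : Int) (b : Int) v = r.set a ((r.getD a []).set b v) := by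
  simp [cellSet]

theorem cellSet_zero_natCast (r : List (List Int)) (b : Nat) (v : Int) :
    cellSet r 0 (b : Int) v = r.set 0 ((r.getD 0 []).set b v) := by simp [cellSet]

theorem shaped_cellSet {N : Nat} {r : List (List Int)} (h : Shaped N r) (a b : Nat)
    (ha : a < N) (v : Int) : Shaped N (r.set a ((r.getD a []).set b v)) := by
  constructor
  · simp [h.1]
  · intro row hrow
    rcases List.mem_or_eq_of_mem_set hrow with h1 | h1
    · exact h.2 _ h1
    · rw [h1, List.length_set]
      exact shaped_row h a ha

theorem mget_set {N : Nat} {r : List (List Int)} (h : Shaped N r) (a b : Nat)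
    (ha : a < N) (_hb : b < N) (i j : Nat) (hi : i < N) (hj : j < N) (v : Int) :
    mget (r.set a ((r.getD a []).set b v)) i j = if i = a ∧ j = b then v else mget r i j := by
  have hr := h.1
  unfold mget
  rw [show (r.set a ((r.getD a []).set b v)).getD i [] =
        ((r.set a ((r.getD a []).set b v))[i]?).getD [] from List.getD_eq_getElem?_getD,
      List.getElem?_set]
  by_cases hia : a = i
  · subst hia
    rw [if_pos rfl, if_pos (by omega : a < r.length)]
    simp only [Option.getD_some]
    rw [show ((r.getD a []).set b v).getD j 0 =
          (((r.getD a []).set b v)[j]?).getD 0 from List.getD_eq_getElem?_getD,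
        List.getElem?_set]
    by_cases hjb : b = j
    · subst hjb
      rw [if_pos rfl, if_pos (by rw [shaped_row h a ha]; omega)]
      simp
    · rw [if_neg hjb, if_neg (by exact fun hc => hjb hc.2.symm)]
      rw [List.getD_eq_getElem?_getD, List.getD_eq_getElem?_getD]
  · rw [if_neg hia, if_neg (by exact fun hc => hia hc.1.symm)]
    rw [show r.getD i [] = (r[i]?).getD [] from List.getD_eq_getElem?_getD]
theorem cnt_zero_of_lt (i j : Nat) (h : j < i) : cnt i j = 0 := by
  cases i with
  | zero => omega
  | succ m => rw [cnt, if_neg (by omega)]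

theorem cnt_step (m j : Nat) (h : m + 1 ≤ j) :
    cnt (m+1) j = cnt m j + (if m + 1 < j then cnt (m+1) (j-1) else 0) := by
  rw [cnt, if_pos h]

-- res0: the zero matrix
theorem res0_spec (n : Int) (hn : 0 ≤ n) :
    ((PySem.List.pyRange 0 (n+1) 1).map
      (fun _ => (PySem.List.pyRange 0 (n+1) 1).map (fun _ => (0 : Int)))) =
    List.replicate (n+1).toNat (List.replicate (n+1).toNat (0 : Int)) := by
  have hl : (PySem.List.pyRange 0 (n+1) 1).length = (n+1).toNat := by
    rw [PySem.List.length_pyRange_one]; omega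
  simp only [List.map_const']
  rw [hl]

theorem shaped_replicate (N : Nat) : Shaped N (List.replicate N (List.replicate N (0 : Int))) := by
  constructor
  · simp
  · intro row hrow
    rw [List.eq_of_mem_replicate hrow]
    simp

theorem mget_replicate (N i j : Nat) :
    mget (List.replicate N (List.replicate N (0 : Int))) i j = 0 := by
  unfold mget
  rw [show (List.replicate N (List.replicate N (0:Int))).getD i [] =
        ((List.replicate N (List.replicate N (0:Int)))[i]?).getD [] from List.getD_eq_getElem?_getD,
      List.getElem?_replicate]
  by_cases hi : i < N
  · rw [if_pos hi]
    simp only [Option.getD_some]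
    rw [List.getD_eq_getElem?_getD, List.getElem?_replicate]
    by_cases hj : j < N
    · rw [if_pos hj]; rfl
    · rw [if_neg hj]; rfl
  · rw [if_neg hi]; simp

-- row 0 initialisation
theorem res1_spec (M : Nat) : ∀ t : Nat, t ≤ M →
    Shaped M ((PySem.List.pyRange 0 (t : Int) 1).foldl (fun r i => cellSet r 0 i 1)
      (List.replicate M (List.replicate M (0 : Int)))) ∧
    ∀ a b : Nat, a < M → b < M →
      mget ((PySem.List.pyRange 0 (t : Int) 1).foldl (fun r i => cellSet r 0 i 1)
        (List.replicate M (List.replicate M (0 : Int)))) a b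
      = if a = 0 ∧ b < t then 1 else 0 := by
  intro t
  induction t with
  | zero =>
    intro _
    rw [show ((0:Nat):Int) = 0 from rfl, PySem.List.pyRange_one_eq_nil le_rfl, List.foldl_nil]
    exact ⟨shaped_replicate _, fun a b _ _ => by rw [mget_replicate]; simp⟩
  | succ t ih =>
    intro ht
    obtain ⟨ihs, ihv⟩ := ih (by omega)
    rw [show ((t + 1 : Nat) : Int) = (t : Int) + 1 from by push_cast; ring,
        PySem.List.pyRange_one_succ_right (by positivity), List.foldl_append,
        List.foldl_cons, List.foldl_nil]
    rw [cellSet_zero_natCast]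
    have hN : 0 < M := by omega
    refine ⟨shaped_cellSet ihs 0 t hN 1, fun a b hA hB => ?_⟩
    rw [mget_set ihs 0 t hN (by omega) a b hA hB 1, ihv a b hA hB]
    by_cases h1 : a = 0 ∧ b = t
    · rw [if_pos h1, if_pos ⟨h1.1, by omega⟩]
    · rw [if_neg h1]
      by_cases h2 : a = 0 ∧ b < t
      · rw [if_pos h2, if_pos ⟨h2.1, by omega⟩]
      · rw [if_neg h2, if_neg (by omega)]

-- one row of the DP fill
theorem inner_spec (M : Nat) (iN : Nat) (hi1 : 1 ≤ iN) (hiN : iN < M)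
    (r : List (List Int)) (hr : Shaped M r)
    (hv : ∀ a b : Nat, a < M → b < M →
      mget r a b = if a < iN then cnt a b else 0) :
    ∀ t : Nat, iN ≤ t → t ≤ M →
      Shaped M ((PySem.List.pyRange (iN : Int) (t : Int) 1).foldl
        (fun r j => cellSet r iN j (cellGet r ((iN : Int)-1) j +
          (if (iN : Int) < j then cellGet r iN (j-1) else 0))) r) ∧
      ∀ a b : Nat, a < M → b < M →
        mget ((PySem.List.pyRange (iN : Int) (t : Int) 1).foldl
          (fun r j => cellSet r iN j (cellGet r ((iN : Int)-1) j +
            (if (iN : Int) < j then cellGet r iN (j-1) else 0))) r) a b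
        = if a < iN then cnt a b else if a = iN ∧ b < t then cnt a b else 0 := by
  intro t
  induction t with
  | zero =>
    intro h1 _
    omega
  | succ t ih =>
    intro h1 h2
    by_cases he : iN = t + 1
    · rw [PySem.List.pyRange_one_eq_nil (by exact_mod_cast Nat.le_of_eq he.symm), List.foldl_nil]
      refine ⟨hr, fun a b hA hB => ?_⟩
      rw [hv a b hA hB]
      by_cases hc : a < iN
      · rw [if_pos hc, if_pos hc]
      · rw [if_neg hc, if_neg hc]
        by_cases hd : a = iN ∧ b < t + 1
        · rw [if_pos hd, hd.1, cnt_zero_of_lt iN b (by omega)]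
        · rw [if_neg hd]
    · have hle : iN ≤ t := by omega
      obtain ⟨ihs, ihv⟩ := ih hle (by omega)
      rw [show ((t + 1 : Nat) : Int) = (t : Int) + 1 from by push_cast; ring,
          PySem.List.pyRange_one_succ_right (by exact_mod_cast hle), List.foldl_append,
          List.foldl_cons, List.foldl_nil]
      set r2 := (PySem.List.pyRange (iN : Int) (t : Int) 1).foldl
          (fun r j => cellSet r iN j (cellGet r ((iN : Int)-1) j +
            (if (iN : Int) < j then cellGet r iN (j-1) else 0))) r with hr2
      have hvget : cellGet r2 ((iN : Int)-1) (t : Int) +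
          (if (iN : Int) < (t : Int) then cellGet r2 (iN : Int) ((t : Int)-1) else 0) = cnt iN t := by
        rw [show ((iN : Int) - 1) = ((iN - 1 : Nat) : Int) from by push_cast [Nat.cast_sub hi1]; ring]
        rw [cellGet_eq_mget _ _ _ (by positivity) (by positivity)]
        simp only [Int.toNat_natCast]
        rw [ihv (iN - 1) t (by omega) (by omega), if_pos (by omega)]
        obtain ⟨m, rfl⟩ : ∃ m, iN = m + 1 := ⟨iN - 1, by omega⟩
        rw [cnt_step m t hle]
        simp only [Nat.add_sub_cancel]
        by_cases hlt : m + 1 < t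
        · rw [if_pos (by exact_mod_cast hlt), if_pos hlt]
          rw [show ((t : Nat) : Int) - 1 = ((t - 1 : Nat) : Int) from by push_cast [Nat.cast_sub (by omega : 1 ≤ t)]; ring]
          rw [cellGet_eq_mget _ _ _ (by positivity) (by positivity)]
          simp only [Int.toNat_natCast]
          rw [ihv (m+1) (t-1) (by omega) (by omega), if_neg (by omega), if_pos (by omega)]
        · rw [if_neg (by exact_mod_cast hlt), if_neg hlt]
      rw [cellSet_natCast, hvget]
      refine ⟨shaped_cellSet ihs iN t hiN _, fun a b hA hB => ?_⟩
      rw [mget_set ihs iN t hiN (by omega) a b hA hB _, ihv a b hA hB]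
      by_cases hc : a = iN ∧ b = t
      · rw [if_pos hc, if_neg (by omega), if_pos ⟨hc.1, by omega⟩, hc.1, hc.2]
      · rw [if_neg hc]
        by_cases hd : a < iN
        · rw [if_pos hd, if_pos hd]
        · rw [if_neg hd, if_neg hd]
          by_cases hE : a = iN ∧ b < t
          · rw [if_pos hE, if_pos ⟨hE.1, by omega⟩]
          · rw [if_neg hE, if_neg (by omega)]

theorem outer_spec (M : Nat) (_hM : 1 ≤ M) : ∀ t : Nat, 1 ≤ t → t ≤ M →
    Shaped M ((PySem.List.pyRange 1 (t : Int) 1).foldl (fun r i =>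
      (PySem.List.pyRange i (M : Int) 1).foldl (fun r j =>
        cellSet r i j (cellGet r (i-1) j + (if i < j then cellGet r i (j-1) else 0))) r)
      ((PySem.List.pyRange 0 (M : Int) 1).foldl (fun r i => cellSet r 0 i 1)
        (List.replicate M (List.replicate M (0 : Int))))) ∧
    ∀ a b : Nat, a < M → b < M →
      mget ((PySem.List.pyRange 1 (t : Int) 1).foldl (fun r i =>
        (PySem.List.pyRange i (M : Int) 1).foldl (fun r j =>
          cellSet r i j (cellGet r (i-1) j + (if i < j then cellGet r i (j-1) else 0))) r)
        ((PySem.List.pyRange 0 (M : Int) 1).foldl (fun r i => cellSet r 0 i 1)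
          (List.replicate M (List.replicate M (0 : Int))))) a b
      = if a < t then cnt a b else 0 := by
  intro t
  induction t with
  | zero => intro h; omega
  | succ t ih =>
    intro _ h2
    cases Nat.eq_or_lt_of_le (by omega : 1 ≤ t + 1) with
    | inl h1 =>
      rw [show ((t + 1 : Nat) : Int) = (1 : Int) from by omega, PySem.List.pyRange_one_eq_nil le_rfl,
          List.foldl_nil]
      obtain ⟨s1, v1⟩ := res1_spec M M le_rfl
      refine ⟨s1, fun a b hA hB => ?_⟩
      rw [v1 a b hA hB]
      by_cases hc : a = 0
      · subst hc
        rw [if_pos ⟨rfl, hB⟩, if_pos (by omega), show cnt 0 b = 1 from by simp [cnt]]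
      · rw [if_neg (by omega), if_neg (by omega)]
    | inr h1 =>
      have h1' : 1 ≤ t := by omega
      obtain ⟨ihs, ihv⟩ := ih h1' (by omega)
      rw [show ((t + 1 : Nat) : Int) = (t : Int) + 1 from by push_cast; ring,
          PySem.List.pyRange_one_succ_right (by exact_mod_cast h1'), List.foldl_append,
          List.foldl_cons, List.foldl_nil]
      have hinner := inner_spec M t h1' (by omega) _ ihs
        (fun a b hA hB => ihv a b hA hB) M (by omega) le_rfl
      obtain ⟨hs2, hv2⟩ := hinner
      refine ⟨hs2, fun a b hA hB => ?_⟩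
      rw [hv2 a b hA hB]
      by_cases hc : a < t
      · rw [if_pos hc, if_pos (by omega)]
      · rw [if_neg hc]
        by_cases hd : a = t
        · rw [if_pos ⟨hd, hB⟩, if_pos (by omega)]
        · rw [if_neg (by omega), if_neg (by omega)]
theorem walk_eq (n : Int) (hn : 0 ≤ n) (res : List (List Int))
    (hres : ∀ a b : Nat, a < (n+1).toNat → b < (n+1).toNat → mget res a b = cnt a b) :
    ∀ (f : Nat) (i j k : Int) (s : String), 0 ≤ i → i ≤ j → j ≤ n →
      f = (i + j).toNat → k ≤ cnt i.toNat j.toNat →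
      walkA res f i j k s = walkB f i j k s := by
  intro f
  induction f with
  | zero => intro i j k s _ _ _ _ _; rw [walkA, walkB]
  | succ f ih =>
    intro i j k s h0 hij hjn hf hk
    have hj1 : 1 ≤ j := by omega
    rw [walkA, walkB, if_pos (by omega : i > 0 ∨ j > 0), if_pos (by omega : i > 0 ∨ j > 0)]
    by_cases hi : i > 0
    · have hA : cellGet res (i-1) j = cnt (i-1).toNat j.toNat := by
        rw [cellGet_eq_mget _ _ _ (by omega) (by omega)]
        exact hres _ _ (by omega) (by omega)
      have hB : ballotB (i-1) j = cnt (i-1).toNat j.toNat :=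
        ballotB_eq _ _ (by omega) (by omega)
      by_cases hc : cnt (i-1).toNat j.toNat ≥ k
      · rw [if_pos ⟨hi, by rw [hA]; exact hc⟩, if_pos ⟨hi, by rw [hB]; exact hc⟩]
        exact ih (i-1) j k _ (by omega) (by omega) hjn (by omega) hc
      · -- ')' branch with i > 0; first show i < j
        have hilt : i < j := by
          rcases lt_or_eq_of_le hij with h | h
          · exact h
          · exfalso
            subst h
            obtain ⟨m, hm⟩ : ∃ m, i.toNat = m + 1 := ⟨i.toNat - 1, by omega⟩
            have : cnt i.toNat i.toNat = cnt (i-1).toNat i.toNat := by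
              rw [hm, show (i-1).toNat = m from by omega, cnt_step m (m+1) le_rfl,
                  if_neg (by omega)]
              ring
            omega
        rw [if_neg (by rw [hA]; omega), if_neg (by rw [hB]; omega), if_pos hi, hA, hB]
        have hrec : k - cnt (i-1).toNat j.toNat ≤ cnt i.toNat (j-1).toNat := by
          obtain ⟨m, hm⟩ : ∃ m, i.toNat = m + 1 := ⟨i.toNat - 1, by omega⟩
          have hs := cnt_step m j.toNat (by omega)
          rw [if_pos (by omega)] at hs
          rw [hm, show (j-1).toNat = j.toNat - 1 from by omega]
          rw [hm] at hk
          rw [show (i-1).toNat = m from by omega]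
          omega
        exact ih i (j-1) _ _ (by omega) (by omega) (by omega) (by omega) hrec
    · -- i = 0 : both sides only emit ')' from here on
      have hi0 : i = 0 := by omega
      subst hi0
      obtain ⟨g, hg⟩ : ∃ g : Nat, j = ((g + 1 : Nat) : Int) := ⟨j.toNat - 1, by omega⟩
      rw [if_neg (by simp), if_neg (by simp), if_neg (by simp)]
      have hjf : f = g := by omega
      subst hjf
      rw [hg, show ((f + 1 : Nat) : Int) - 1 = (f : Int) from by push_cast; ring]
      rw [walkA_tail res f _ _, walkB_tail f _ _]

-- ===== VERDICT (by name: the statement is the Claim_ definition above) =====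
theorem solveBD2015_spec : Claim_equal_solveBD2015 := by
  unfold Claim_equal_solveBD2015
  intro n k _ hpre
  unfold Pre_solveBD2015 at hpre
  unfold Spec_solveBD2015 solveBD2015 solveBD2015_alt
  simp only []
  obtain ⟨M, hM2⟩ : ∃ M : Nat, n + 1 = (M : Int) := ⟨(n+1).toNat, by omega⟩
  rw [res0_spec n hpre, hM2]
  simp only [Int.toNat_natCast]
  have hM : 1 ≤ M := by omega
  obtain ⟨hshape, hvals⟩ := outer_spec M hM M hM le_rfl
  set res2 := ((PySem.List.pyRange 1 (M : Int) 1).foldl (fun r i =>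
      (PySem.List.pyRange i (M : Int) 1).foldl (fun r j =>
        cellSet r i j (cellGet r (i-1) j + (if i < j then cellGet r i (j-1) else 0))) r)
      ((PySem.List.pyRange 0 (M : Int) 1).foldl (fun r i => cellSet r 0 i 1)
        (List.replicate M (List.replicate M (0 : Int))))) with hres2
  have htab : ∀ a b : Nat, a < M → b < M → mget res2 a b = cnt a b :=
    fun a b hA hB => by rw [hvals a b hA hB, if_pos hA]
  have hget : cellGet res2 n n = cnt n.toNat n.toNat := by
    rw [cellGet_eq_mget _ _ _ hpre hpre]
    exact htab _ _ (by omega) (by omega)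
  have hbal : ballotB n n = cnt n.toNat n.toNat := ballotB_eq n n hpre le_rfl
  rw [hget, hbal]
  by_cases hc : k > cnt n.toNat n.toNat
  · rw [if_pos hc, if_pos hc]
  · rw [if_neg hc, if_neg hc]
    exact walk_eq n hpre res2 (fun a b hA hB => htab a b (by omega) (by omega))
      (n+n).toNat n n k "" hpre le_rfl le_rfl rfl (by omega)
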